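-- pv_equiv track=rewrite | github.com/sdhers/RAINSTORM | rainstorm/seize_labels/plot_roi_activity.py | _count_alternations_and_entries
-- ===== SOURCE A (Python) =====
-- from typing import List, Tuple
--
-- def _count_alternations_and_entries(area_sequence: List[str]) -> Tuple[int, int]:
--     """
--     Counts alternations and total entries from a sequence of visited areas.
--     An alternation is a sequence of three different, consecutive area entries (e.g., A -> B -> C).
--
--     Args:
--         area_sequence (List[str]): Ordered list of visited area names.
--
--     Returns:
--         Tuple[int, int]: A tuple containing (number of alternations, total number of area entries).
--     """
--     # Filter out consecutive duplicates to get a sequence of area *entrances*.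
--     entry_sequence = [area_sequence[i] for i in range(len(area_sequence)) if i == 0 or area_sequence[i] != area_sequence[i - 1]]
--
--     # Exclude 'other' from the sequence as it's not a target ROI.
--     entry_sequence = [area for area in entry_sequence if area != "other"]
--
--     total_entries = len(entry_sequence)
--     alternations = 0
--
--     # An alternation requires at least 3 entries to be possible.
--     if total_entries < 3:
--         return 0, total_entries
--
--     # Iterate through triplets of entries to find alternations (e.g., A, B, C where A!=B, B!=C, A!=C)
--     for i in range(len(entry_sequence) - 2):
--         # Check if the three consecutive entries are all unique
--         if len(set(entry_sequence[i:i+3])) == 3: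
--             alternations += 1
--
--     return alternations, total_entries
-- ===== SOURCE B (Python) =====
-- from typing import List, Tuple
--
-- def _count_alternations_and_entries(area_sequence: List[str]) -> Tuple[int, int]:
--     """One fused pass: detect entrances against the raw previous element and
--     keep only the last two accepted entries; no intermediate lists."""
--     prev_raw = None
--     e1 = None
--     e2 = None
--     alternations = 0
--     total_entries = 0
--     for area in area_sequence:
--         if area != prev_raw:
--             prev_raw = area
--             if area != "other":
--                 total_entries += 1
--                 if e1 is not None and e1 != e2 and e2 != area and e1 != area:
--                     alternations += 1
--                 e1, e2 = e2, area
--     return alternations, total_entries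
-- ===== Notes on version B (the rewrite author's own statement) =====
-- stated objective: faster
-- what changed: Replaced A's three materialized passes (index-based dedup comprehension, 'other' filter, then a sliding-window loop taking set() of each 3-slice) by one fused pass over the raw sequence that keeps only the last raw element and the last two accepted entries, counting entries and pairwise-distinct triples on the fly with no intermediate lists.
import Mathlib
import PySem

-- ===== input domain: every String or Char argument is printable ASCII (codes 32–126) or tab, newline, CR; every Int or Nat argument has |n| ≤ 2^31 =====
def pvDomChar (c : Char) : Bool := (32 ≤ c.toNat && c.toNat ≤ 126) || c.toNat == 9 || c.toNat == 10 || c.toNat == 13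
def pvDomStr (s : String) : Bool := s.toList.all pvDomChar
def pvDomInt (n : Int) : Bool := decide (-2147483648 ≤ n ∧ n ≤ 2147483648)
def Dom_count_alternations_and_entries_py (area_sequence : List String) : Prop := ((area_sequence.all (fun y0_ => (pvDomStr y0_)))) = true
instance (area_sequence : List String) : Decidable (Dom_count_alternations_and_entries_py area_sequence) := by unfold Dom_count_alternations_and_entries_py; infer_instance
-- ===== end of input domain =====

-- B replaces A's three materialized passes by one fused pass that keeps only the last raw
-- element and the last two accepted entries (objective: faster, constant-factor / no allocation).

-- ===== PORT A =====
def count_alternations_and_entries_py (area_sequence : List String) : Int × Int :=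
  -- entry_sequence = [area_sequence[i] for i in range(len) if i == 0 or a[i] != a[i-1]]
  let entry1 : List String :=
    (PySem.List.pyRange 0 (area_sequence.length : Int) 1).foldl
      (fun acc i =>
        if i == 0 || PySem.List.pyGetD area_sequence i "" != PySem.List.pyGetD area_sequence (i - 1) "" then
          acc ++ [PySem.List.pyGetD area_sequence i ""]
        else acc) []
  -- entry_sequence = [area for area in entry_sequence if area != "other"]
  let entry : List String := entry1.foldl (fun acc a => if a != "other" then acc ++ [a] else acc) []
  let total : Int := entry.length
  if total < 3 then (0, total)
  else
    -- for i in range(len(entry_sequence) - 2): if len(set(entry_sequence[i:i+3])) == 3: alternations += 1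
    let alternations : Int :=
      (PySem.List.pyRange 0 ((entry.length : Int) - 2) 1).foldl
        (fun alt i =>
          if (PySem.Set.ofList (PySem.List.slice entry (some i) (some (i + 3)))).length == 3 then
            alt + 1
          else alt) 0
    (alternations, total)

-- ===== PORT B =====
-- B's loop body: state = (prev_raw, e1, e2, alternations, total_entries)
def pvStepB (s : Option String × Option String × Option String × Int × Int) (area : String) :
    Option String × Option String × Option String × Int × Int :=
  match s with
  | (prev, e1, e2, alt, tot) =>
    if some area != prev then
      if area != "other" then
        let alt' := if e1.isSome && e1 != e2 && e2 != some area && e1 != some area then alt + 1 else alt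
        (some area, e2, some area, alt', tot + 1)
      else (some area, e1, e2, alt, tot)
    else (prev, e1, e2, alt, tot)

def count_alternations_and_entries_py_alt (area_sequence : List String) : Int × Int :=
  let s := area_sequence.foldl pvStepB (none, none, none, 0, 0)
  (s.2.2.2.1, s.2.2.2.2)

-- ===== PRECONDITION & SPEC =====
def Spec_count_alternations_and_entries_py (area_sequence : List String) (out : Int × Int) : Prop := out = count_alternations_and_entries_py_alt area_sequence
instance (area_sequence : List String) (out : Int × Int) : Decidable (Spec_count_alternations_and_entries_py area_sequence out) := by unfold Spec_count_alternations_and_entries_py; infer_instance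

-- ===== CLAIM (what is proved, stated in full; the proofs are below) =====
def Claim_equal_count_alternations_and_entries_py : Prop := ∀ (area_sequence : List String), Dom_count_alternations_and_entries_py area_sequence → Spec_count_alternations_and_entries_py area_sequence (count_alternations_and_entries_py area_sequence)

-- ===== LEMMAS AND PROOFS =====

-- reference: structural dedup of consecutive duplicates (first element kept, rest vs previous)
def pvDedGo (p : String) : List String → List String
  | [] => []
  | y :: ys => if y ≠ p then y :: pvDedGo y ys else pvDedGo p ys

def pvDed : List String → List String
  | [] => []
  | x :: xs => x :: pvDedGo x xs

-- reference triple counter over the filtered entry sequence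
def pvTri3 : List String → Int
  | a :: b :: c :: r =>
      (if (PySem.Set.ofList [a, b, c]).length == 3 then 1 else 0) + pvTri3 (b :: c :: r)
  | _ => 0

-- B-side counters: triple count and final (e1, e2) state, threaded like B's loop
def pvTriW (e1 e2 : Option String) : List String → Int
  | [] => 0
  | a :: r =>
      (if e1.isSome && e1 != e2 && e2 != some a && e1 != some a then 1 else 0) + pvTriW e2 (some a) r

def pvSh (e1 e2 : Option String) : List String → Option String × Option String
  | [] => (e1, e2)
  | a :: r => pvSh e2 (some a) r

theorem pvSet3_len (x y a : String) : ((PySem.Set.ofList [x, y, a]).length == 3) =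
    (!(x == y) && !(y == a) && !(x == a)) := by
  by_cases h1 : x = y <;> by_cases h2 : y = a <;> by_cases h3 : x = a <;>
    simp_all [PySem.Set.ofList, PySem.Set.add, PySem.Set.empty,
      fun (h : ¬ y = a) => (Ne.symm h : ¬ a = y),
      fun (h : ¬ x = a) => (Ne.symm h : ¬ a = x),
      fun (h : ¬ x = y) => (Ne.symm h : ¬ y = x)]

theorem pvTriW_some (r : List String) : ∀ (a b : String),
    pvTriW (some a) (some b) r = pvTri3 (a :: b :: r) := by
  induction r with
  | nil => intro a b; simp [pvTriW, pvTri3]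
  | cons c r ih =>
      intro a b
      simp only [pvTriW, pvTri3, ih, pvSet3_len]
      have h : ((some a).isSome && some a != some b && some b != some c && some a != some c) =
          (!(a == b) && !(b == c) && !(a == c)) := by simp [bne]
      rw [h]

theorem pvTriW_eq_tri3 (es : List String) : pvTriW none none es = pvTri3 es := by
  match es with
  | [] => simp [pvTriW, pvTri3]
  | [a] => simp [pvTriW, pvTri3]
  | a :: b :: r => simp [pvTriW, pvTriW_some, pvTri3]

theorem pvTri3_short (es : List String) (h : es.length < 3) : pvTri3 es = 0 := by
  match es, h with
  | [], _ => rfl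
  | [a], _ => rfl
  | [a, b], _ => rfl

theorem pvDedGo_append (ys : List String) : ∀ (p a : String),
    pvDedGo p (ys ++ [a]) = pvDedGo p ys ++ (if a ≠ ys.getLastD p then [a] else []) := by
  induction ys with
  | nil => intro p a; simp [pvDedGo]
  | cons y ys ih =>
      intro p a
      by_cases h : y = p
      · subst h
        simp only [pvDedGo, List.cons_append, ih, List.getLastD_cons]
        simp
      · simp only [pvDedGo, List.cons_append, ih, List.getLastD_cons]
        simp [h]

theorem pvGetLastD_eq_getD (t : List String) : ∀ (x d : String),
    t.getLastD x = (x :: t).getD t.length d := by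
  induction t with
  | nil => intro x d; simp
  | cons y t ih =>
      intro x d
      simp only [List.getLastD_cons, List.length_cons, List.getD_cons_succ]
      exact ih y d

theorem pvDed_append (xs : List String) (a : String) :
    pvDed (xs ++ [a]) = pvDed xs ++
      (if xs.length = 0 ∨ a ≠ xs.getD (xs.length - 1) "" then [a] else []) := by
  match xs with
  | [] => simp [pvDed, pvDedGo]
  | x :: t =>
      simp only [List.cons_append, pvDed, pvDedGo_append]
      rw [pvGetLastD_eq_getD t x ""]
      simp

-- A's index comprehension (in Nat form) equals the structural dedup
theorem pvIdxNat (xs : List String) :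
    ((List.range xs.length).filter (fun k => k == 0 || xs.getD k "" != xs.getD (k-1) "")).map
      (fun k => xs.getD k "") = pvDed xs := by
  induction xs using List.reverseRecOn with
  | nil => simp [pvDed]
  | append_singleton xs a ih =>
    have hlen : (xs ++ [a]).length = xs.length + 1 := by simp
    rw [hlen, List.range_succ, List.filter_append, List.map_append]
    have hfil : (List.range xs.length).filter
          (fun k => k == 0 || (xs ++ [a]).getD k "" != (xs ++ [a]).getD (k-1) "")
        = (List.range xs.length).filter (fun k => k == 0 || xs.getD k "" != xs.getD (k-1) "") := by
      apply List.filter_congr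
      intro k hk
      have hk' : k < xs.length := List.mem_range.mp hk
      match k with
      | 0 => simp
      | j + 1 =>
        rw [List.getD_append _ _ _ _ hk', List.getD_append _ _ _ _ (by omega)]
    rw [hfil]
    have hmap : ((List.range xs.length).filter
          (fun k => k == 0 || xs.getD k "" != xs.getD (k-1) "")).map
          (fun k => (xs ++ [a]).getD k "")
        = ((List.range xs.length).filter
          (fun k => k == 0 || xs.getD k "" != xs.getD (k-1) "")).map (fun k => xs.getD k "") := by
      apply List.map_congr_left
      intro k hk
      have hk' : k < xs.length := List.mem_range.mp (List.mem_of_mem_filter hk)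
      exact List.getD_append _ _ _ _ hk'
    rw [hmap, ih, pvDed_append]
    congr 1
    have ha : (xs ++ [a]).getD xs.length "" = a := by
      rw [List.getD_append_right _ _ _ _ (le_refl _)]
      simp
    by_cases h0 : xs.length = 0
    · simp [h0, ha]
    · have h1 : xs.length - 1 < xs.length := by omega
      rw [List.filter_singleton]
      simp only [ha, List.getD_append _ _ _ _ h1]
      by_cases hne : a = xs.getD (xs.length - 1) ""
      · simp [h0, hne, Bool.cond_eq_ite, beq_iff_eq]
      · simp only [List.getD] at hne ha
        simp [h0, hne, Bool.cond_eq_ite, beq_iff_eq, ha]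

-- A's first comprehension equals the structural dedup
theorem pvEntry1 (xs : List String) :
    (PySem.List.pyRange 0 (xs.length : Int) 1).foldl
      (fun acc i =>
        if i == 0 || PySem.List.pyGetD xs i "" != PySem.List.pyGetD xs (i - 1) "" then
          acc ++ [PySem.List.pyGetD xs i ""]
        else acc) [] = pvDed xs := by
  rw [PySem.List.foldl_append_if
        (fun i => i == 0 || PySem.List.pyGetD xs i "" != PySem.List.pyGetD xs (i - 1) "")
        (fun i => PySem.List.pyGetD xs i ""),
      PySem.List.pyRange_zero_natCast, List.filter_map, List.map_map, List.nil_append]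
  have hfil : (List.range xs.length).filter
        ((fun i => i == 0 || PySem.List.pyGetD xs i "" != PySem.List.pyGetD xs (i - 1) "") ∘
          (fun k : Nat => (k : Int)))
      = (List.range xs.length).filter (fun k => k == 0 || xs.getD k "" != xs.getD (k-1) "") := by
    apply List.filter_congr
    intro k hk
    have hk' : k < xs.length := List.mem_range.mp hk
    match k with
    | 0 => simp [Function.comp]
    | j + 1 =>
      have h1 : ((((j+1 : Nat) : Int)) - 1) = ((j : Nat) : Int) := by push_cast; ring
      simp only [Function.comp_apply, h1, PySem.List.pyGetD_natCast]
      simp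
      intro h
      exact absurd h (by omega)
  rw [hfil]
  have hmap : ((List.range xs.length).filter
        (fun k => k == 0 || xs.getD k "" != xs.getD (k-1) "")).map
        ((fun i => PySem.List.pyGetD xs i "") ∘ (fun k : Nat => (k : Int)))
      = ((List.range xs.length).filter
        (fun k => k == 0 || xs.getD k "" != xs.getD (k-1) "")).map (fun k => xs.getD k "") := by
    apply List.map_congr_left
    intro k _
    simp only [Function.comp_apply, PySem.List.pyGetD_natCast]
  rw [hmap, pvIdxNat]

theorem pvSliceNat (es : List String) (k : Nat) :
    PySem.List.slice es (some (k : Int)) (some ((k : Int) + 3)) = (es.drop k).take 3 := by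
  rw [PySem.List.slice_toNat es (by positivity) (by positivity)]
  norm_num
  congr 1
  omega

-- the triple-window fold (Nat range form) equals pvTri3
theorem pvWin (es : List String) : ∀ (acc : Int),
    (List.range (es.length - 2)).foldl
        (fun alt k =>
          if (PySem.Set.ofList ((es.drop k).take 3)).length == 3 then alt + 1 else alt) acc
      = acc + pvTri3 es := by
  induction es with
  | nil => intro acc; simp [pvTri3]
  | cons a t ih =>
    match t with
    | [] => intro acc; simp [pvTri3]
    | [b] => intro acc; simp [pvTri3]
    | b :: c :: t' =>
      intro acc
      have hl : (a :: b :: c :: t').length - 2 = t'.length + 1 := by simp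
      rw [hl, List.range_succ_eq_map]
      simp only [List.foldl_cons, List.foldl_map, List.drop_succ_cons, List.drop_zero]
      have hl2 : (b :: c :: t').length - 2 = t'.length := by simp
      have ih' := ih (if (PySem.Set.ofList ((a :: b :: c :: t').take 3)).length == 3 then acc + 1 else acc)
      rw [hl2] at ih'
      refine ih'.trans ?_
      simp only [pvTri3, List.take_succ_cons, List.take_zero]
      split <;> ring

-- A's triple-window loop over pyRange equals pvTri3
theorem pvLoopA (es : List String) :
    (PySem.List.pyRange 0 ((es.length : Int) - 2) 1).foldl
        (fun alt i =>
          if (PySem.Set.ofList (PySem.List.slice es (some i) (some (i + 3)))).length == 3 then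
            alt + 1
          else alt) 0 = pvTri3 es := by
  rw [PySem.List.pyRange_one]
  have h : ((es.length : Int) - 2 - 0).toNat = es.length - 2 := by omega
  rw [h, List.foldl_map]
  simp only [zero_add, pvSliceNat]
  simpa using pvWin es 0

-- A computes (pvTri3 es, |es|) for es = the 'other'-filtered dedup
theorem pvA_closed (xs : List String) :
    count_alternations_and_entries_py xs =
      (pvTri3 ((pvDed xs).filter (fun a => a != "other")),
       (((pvDed xs).filter (fun a => a != "other")).length : Int)) := by
  unfold count_alternations_and_entries_py
  simp only [pvEntry1, PySem.List.foldl_append_if_eq_filter, List.nil_append]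
  set es := (pvDed xs).filter (fun a => a != "other") with hes
  by_cases h : ((es.length : Int)) < 3
  · rw [if_pos h]
    have : pvTri3 es = 0 := pvTri3_short es (by omega)
    simp [this]
  · rw [if_neg h]
    simp only [pvLoopA]

theorem pvLast_cons (ys : List String) : ∀ (y p : String),
    (y :: ys).getLast?.getD p = ys.getLast?.getD y := by
  induction ys with
  | nil => intro y p; simp
  | cons z t ih =>
      intro y p
      rw [List.getLast?_cons_cons, ih z p, ih z y]

-- B's loop, from a state that has already seen a raw element p
theorem pvFoldB_go (xs : List String) : ∀ (p : String) (e1 e2 : Option String) (alt tot : Int),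
    xs.foldl pvStepB (some p, e1, e2, alt, tot)
    = (some (xs.getLastD p),
       (pvSh e1 e2 ((pvDedGo p xs).filter (fun a => a != "other"))).1,
       (pvSh e1 e2 ((pvDedGo p xs).filter (fun a => a != "other"))).2,
       alt + pvTriW e1 e2 ((pvDedGo p xs).filter (fun a => a != "other")),
       tot + ((pvDedGo p xs).filter (fun a => a != "other")).length) := by
  induction xs with
  | nil => intro p e1 e2 alt tot; simp [pvDedGo, pvSh, pvTriW]
  | cons a rest ih =>
    intro p e1 e2 alt tot
    rw [List.foldl_cons]
    by_cases hp : a = p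
    · subst hp
      simp [pvStepB, pvDedGo, pvLast_cons, ih]
    · by_cases ho : a = "other"
      · subst ho
        simp [pvStepB, hp, pvDedGo, pvLast_cons, ih,
          fun (h : ¬ "other" = p) => (Ne.symm h : ¬ p = "other")]
      · simp [pvStepB, hp, ho, pvDedGo, pvLast_cons, ih, pvTriW, pvSh,
          fun (h : ¬ a = p) => (Ne.symm h : ¬ p = a)]
        refine ⟨?_, ?_⟩
        · split <;> omega
        · omega

theorem pvB_closed (xs : List String) :
    count_alternations_and_entries_py_alt xs =
      (pvTriW none none ((pvDed xs).filter (fun a => a != "other")),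
       (((pvDed xs).filter (fun a => a != "other")).length : Int)) := by
  match xs with
  | [] => rfl
  | a :: rest =>
    unfold count_alternations_and_entries_py_alt
    rw [List.foldl_cons]
    by_cases ho : a = "other"
    · subst ho
      simp [pvStepB, pvFoldB_go, pvDed, pvDedGo, pvTriW]
    · simp [pvStepB, ho, pvFoldB_go, pvDed, pvDedGo, pvTriW, pvSh]
      omega

-- ===== VERDICT (by name: the statement is the Claim_ definition above) =====
theorem count_alternations_and_entries_py_spec : Claim_equal_count_alternations_and_entries_py := by
  intro xs _
  unfold Spec_count_alternations_and_entries_py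
  rw [pvA_closed, pvB_closed, pvTriW_eq_tri3]
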